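-- pv_equiv track=rewrite | github.com/ChrisKolios/CPS109_Fall2022 | Lab2/Quizzes/Quiz_Thursday_8am_SampleSoln.py | Th8_SSBF
-- ===== SOURCE A (Python) =====
-- def Th8_SSBF(my_list): # Bonus
--     num_vowels = 0
--     my_uwuified_list = []
--     for string_element in my_list:
--         partially_uwuified_string_element = string_element.replace("r", "w")
--         uwuified_string_element = partially_uwuified_string_element.replace("l", "w")
--         my_uwuified_list.append(uwuified_string_element)
--         word_list = string_element.split() # by default splits by whitespace
--         for word in word_list:
--             for ce in word: # Character element
--                 if (ce == "a" or ce == "e" or ce == "i" or ce == "o" or ce == "u"):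
--                     num_vowels += 1
--             if (word[-1] == "y"): # Notice we only have to check for y at the end of the word
--                 # Again, this is by relaxed assumptions in the problem statement (consider punctuation!)
--                 num_vowels += 1
--     return num_vowels, my_uwuified_list # We could equivalently return [num_vowels, my_uwuified_list]
-- ===== SOURCE B (Python) =====
-- def Th8_SSBF(my_list):
--     table = str.maketrans("rl", "ww")
--     my_uwuified_list = [s.translate(table) for s in my_list]
--     freq = {}
--     for ch in "".join(my_list):
--         freq[ch] = freq.get(ch, 0) + 1
--     num_vowels = sum(freq.get(v, 0) for v in "aeiou")
--     num_vowels += sum(w.endswith("y") for s in my_list for w in s.split())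
--     return num_vowels, my_uwuified_list
-- ===== Notes on version B (the rewrite author's own statement) =====
-- stated objective: alternative
-- what changed: Replaces A's single interleaved loop (chained r/l replaces, nested per-word per-char or-chain vowel test, word[-1] check) by a str.maketrans/translate table for uwuification, a character-frequency dict built once over the joined text with five vowel lookups for the vowel count (valid since whitespace is never a vowel), and a separate endswith-based trailing-'y' pass over the split words.
import Mathlib
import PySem

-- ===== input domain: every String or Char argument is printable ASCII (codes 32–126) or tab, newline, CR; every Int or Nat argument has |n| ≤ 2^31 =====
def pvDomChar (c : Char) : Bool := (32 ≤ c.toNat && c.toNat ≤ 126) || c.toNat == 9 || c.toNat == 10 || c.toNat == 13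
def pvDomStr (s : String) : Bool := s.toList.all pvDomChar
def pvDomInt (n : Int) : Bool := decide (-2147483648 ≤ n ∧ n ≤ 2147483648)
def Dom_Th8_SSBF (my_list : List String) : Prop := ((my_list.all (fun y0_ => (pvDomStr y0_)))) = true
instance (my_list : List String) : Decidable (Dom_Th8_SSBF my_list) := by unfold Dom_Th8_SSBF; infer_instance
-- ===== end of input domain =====

-- B replaces A's interleaved loop (chained replaces + nested per-word/per-char or-chain vowel
-- test) by a translation-table map for uwuification, a character-frequency dict built once over
-- the joined text with five vowel lookups, and a separate endswith-based trailing-'y' pass;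
-- objective: alternative decomposition, same cost.


-- ===== PORT A =====
def Th8_SSBF (my_list : List String) : Int × List String :=
  let r := my_list.foldl (fun st string_element =>
    let partially_uwuified_string_element := PySem.Str.replace string_element "r" "w"
    let uwuified_string_element := PySem.Str.replace partially_uwuified_string_element "l" "w"
    let my_uwuified_list := st.2 ++ [uwuified_string_element]
    let word_list := PySem.Str.split₀ string_element
    let num_vowels := word_list.foldl (fun n word =>
      let n := word.toList.foldl (fun n ce =>
        if ce == 'a' || ce == 'e' || ce == 'i' || ce == 'o' || ce == 'u' then n + 1 else n) n
      if PySem.Str.pyGet? word (-1) == some 'y' then n + 1 else n) st.1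
    (num_vowels, my_uwuified_list)) ((0 : Int), ([] : List String))
  r

-- ===== PORT B =====
-- str.maketrans/str.translate are ported by hand (PySem has no translate): the table is a
-- char→char dict and translate maps every character through it, identity when absent — exact
-- for a 1-character-to-1-character table like this one.
def Th8_SSBF_alt (my_list : List String) : Int × List String :=
  let table : PySem.Dict Char Char := (PySem.Dict.empty.insert 'r' 'w').insert 'l' 'w'
  let my_uwuified_list := my_list.map (fun s => String.ofList (s.toList.map (fun c => table.getD c c)))
  let freq : PySem.Dict Char Int :=
    (PySem.Str.join "" my_list).toList.foldl
      (fun d ch => d.insert ch (d.getD ch 0 + 1)) PySem.Dict.empty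
  let num_vowels : Int := ("aeiou".toList.map (fun v => freq.getD v 0)).sum
  let num_vowels := num_vowels +
    ((my_list.map (fun s =>
      (((PySem.Str.split₀ s).countP (fun w => PySem.Str.endswith w "y") : Nat) : Int))).sum)
  (num_vowels, my_uwuified_list)

-- ===== PRECONDITION & SPEC =====
def Spec_Th8_SSBF (my_list : List String) (out : Int × List String) : Prop := out = Th8_SSBF_alt my_list
instance (my_list : List String) (out : Int × List String) : Decidable (Spec_Th8_SSBF my_list out) := by unfold Spec_Th8_SSBF; infer_instance

-- ===== CLAIM (what is proved, stated in full; the proofs are below) =====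
def Claim_equal_Th8_SSBF : Prop := ∀ (my_list : List String), Dom_Th8_SSBF my_list → Spec_Th8_SSBF my_list (Th8_SSBF my_list)

-- ===== LEMMAS AND PROOFS =====

def pvVowel (ce : Char) : Bool :=
  ce == 'a' || ce == 'e' || ce == 'i' || ce == 'o' || ce == 'u'

def pvYend (w : String) : Bool := PySem.Str.pyGet? w (-1) == some 'y'

def pvU (s : String) : String := PySem.Str.replace (PySem.Str.replace s "r" "w") "l" "w"

theorem pvVowel_mem (ch : Char) : pvVowel ch = true ↔ ch ∈ "aeiou".toList := by
  have hl : "aeiou".toList = ['a','e','i','o','u'] := rfl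
  rw [hl]
  simp only [pvVowel, Bool.or_eq_true, beq_iff_eq, List.mem_cons, List.not_mem_nil, or_false]
  tauto

-- a vowel is never whitespace
theorem pvVowel_not_space (c : Char) (h : pvVowel c = true) : PySem.Chars.isspace c = false := by
  have hm := (pvVowel_mem c).mp h
  rw [show "aeiou".toList = ['a','e','i','o','u'] from rfl] at hm
  fin_cases hm <;> decide

-- flatten of split() is the string with its whitespace removed
theorem pvGo_flatten (s cur : List Char) (acc : List (List Char)) :
    (PySem.Chars.split₀.go s cur acc).flatten
      = acc.reverse.flatten ++ cur.reverse ++ s.filter (fun c => !PySem.Chars.isspace c) := by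
  induction s generalizing cur acc with
  | nil =>
    by_cases h : cur = []
    · simp [PySem.Chars.split₀.go, h]
    · simp [PySem.Chars.split₀.go, h, List.isEmpty_iff]
  | cons c rest ih =>
    by_cases hs : PySem.Chars.isspace c = true
    · by_cases h : cur = []
      · simp [PySem.Chars.split₀.go, hs, h, ih]
      · simp [PySem.Chars.split₀.go, hs, h, List.isEmpty_iff, ih]
    · simp only [Bool.not_eq_true] at hs
      simp [PySem.Chars.split₀.go, hs, ih]

theorem pvSplit_flatten (cs : List Char) :
    (PySem.Chars.split₀ cs).flatten = cs.filter (fun c => !PySem.Chars.isspace c) := by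
  simpa using pvGo_flatten cs [] []

-- vowel counting per word agrees with vowel counting over the whole string
theorem pvCountP_split (cs : List Char) :
    ((PySem.Chars.split₀ cs).map (fun w => w.countP pvVowel)).sum = cs.countP pvVowel := by
  rw [← List.countP_flatten, pvSplit_flatten, List.countP_filter]
  apply List.countP_congr
  intro c _
  constructor
  · intro h; exact (Bool.and_eq_true ..).mp h |>.1
  · intro h; simp [h, pvVowel_not_space c h]

-- join "" concatenates
theorem pvJoin_flatten (xss : List (List Char)) :
    PySem.Chars.join [] xss = xss.flatten := by
  induction xss with
  | nil => simp [PySem.Chars.join_nil]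
  | cons p rest ih =>
    cases rest with
    | nil => simp [PySem.Chars.join_singleton]
    | cons q r => rw [PySem.Chars.join_cons_cons]; simp [ih]

-- the inner word loop of A is one additive contribution per word
theorem pvWordFold (words : List String) (n : Int) :
    words.foldl (fun n word =>
      let n := word.toList.foldl (fun n ce =>
        if ce == 'a' || ce == 'e' || ce == 'i' || ce == 'o' || ce == 'u' then n + 1 else n) n
      if PySem.Str.pyGet? word (-1) == some 'y' then n + 1 else n) n
    = n + ((words.map (fun w => ((w.toList.countP pvVowel : Nat) : Int)
            + (if pvYend w then 1 else 0))).sum) := by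
  induction words generalizing n with
  | nil => simp
  | cons w rest ih =>
    simp only [List.foldl_cons, List.map_cons, List.sum_cons, ih, pvYend]
    rw [PySem.List.foldl_if_add_one]
    rw [show (fun ce => ce == 'a' || ce == 'e' || ce == 'i' || ce == 'o' || ce == 'u') = pvVowel from rfl]
    split_ifs <;> ring

-- A's per-string contribution
def pvContrib (s : String) : Int :=
  ((s.toList.countP pvVowel : Nat) : Int)
    + (((PySem.Str.split₀ s).countP pvYend : Nat) : Int)

theorem pvContrib_eq (s : String) :
    ((PySem.Str.split₀ s).map (fun w => ((w.toList.countP pvVowel : Nat) : Int)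
      + (if pvYend w then 1 else 0))).sum = pvContrib s := by
  rw [PySem.List.sum_map_add_int, PySem.List.sum_map_ite_one_zero, pvContrib]
  congr 1
  have h1 : ((PySem.Str.split₀ s).map (fun w => ((w.toList.countP pvVowel : Nat) : Int))).sum
      = (((PySem.Str.split₀ s).map (fun w => w.toList.countP pvVowel)).sum : Nat) := by
    induction PySem.Str.split₀ s with
    | nil => simp
    | cons a b ihb => simp [ihb]
  rw [h1]
  congr 1
  have h2 : (PySem.Str.split₀ s).map (fun w => w.toList.countP pvVowel)
      = ((PySem.Str.split₀ s).map String.toList).map (fun w => w.countP pvVowel) := by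
    rw [List.map_map]; rfl
  rw [h2, PySem.Str.split₀_map_toList, pvCountP_split]

-- A's loop body, rewritten additively
theorem pvBody_eq : (fun (st : Int × List String) (string_element : String) =>
      let partially_uwuified_string_element := PySem.Str.replace string_element "r" "w"
      let uwuified_string_element := PySem.Str.replace partially_uwuified_string_element "l" "w"
      let my_uwuified_list := st.2 ++ [uwuified_string_element]
      let word_list := PySem.Str.split₀ string_element
      let num_vowels := word_list.foldl (fun n word =>
        let n := word.toList.foldl (fun n ce =>
          if ce == 'a' || ce == 'e' || ce == 'i' || ce == 'o' || ce == 'u' then n + 1 else n) n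
        if PySem.Str.pyGet? word (-1) == some 'y' then n + 1 else n) st.1
      (num_vowels, my_uwuified_list))
    = (fun st s => (st.1 + pvContrib s, st.2 ++ [pvU s])) := by
  funext st s
  simp only [pvU]
  rw [pvWordFold, pvContrib_eq]

-- the additive loop from an arbitrary state
theorem pvSimpleFold (l : List String) (n : Int) (acc : List String) :
    l.foldl (fun st s => (st.1 + pvContrib s, st.2 ++ [pvU s])) (n, acc)
      = (n + (l.map pvContrib).sum, acc ++ l.map pvU) := by
  induction l generalizing n acc with
  | nil => simp
  | cons s rest ih =>
    simp only [List.foldl_cons, List.map_cons, List.sum_cons, ih, Prod.mk.injEq]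
    refine ⟨by ring, by simp⟩

-- the vowel count over the joined string is the per-string sum
theorem pvJoinCount (l : List String) :
    (((PySem.Str.join "" l).toList.countP pvVowel : Nat) : Int)
      = (l.map (fun s => ((s.toList.countP pvVowel : Nat) : Int))).sum := by
  rw [PySem.Str.toList_join]
  have h0 : ("" : String).toList = [] := rfl
  rw [h0, pvJoin_flatten, List.countP_flatten]
  induction l with
  | nil => simp
  | cons a b ih =>
    rw [List.map_map] at ih
    simp only [List.map_cons, List.sum_cons, List.map_map, Nat.cast_add, ih]

-- single-character replace is a character map
theorem pvReplaceGo (c w : Char) (fuel : Nat) (l acc : List Char) (h : l.length ≤ fuel) :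
    PySem.Chars.replace.go [c] [w] fuel l acc
      = acc.reverse ++ l.map (fun x => if x == c then w else x) := by
  induction fuel generalizing l acc with
  | zero =>
    have : l = [] := List.length_eq_zero_iff.mp (Nat.le_zero.mp h)
    subst this
    simp [PySem.Chars.replace.go]
  | succ fuel ih =>
    cases l with
    | nil => simp [PySem.Chars.replace.go]
    | cons c' t =>
      rw [PySem.Chars.replace.go]
      have hpre : List.isPrefixOf [c] (c' :: t) = (c == c') := by
        simp [List.isPrefixOf]
      rw [hpre]
      by_cases hc : c = c'
      · subst hc
        simp only [beq_self_eq_true, if_true, List.length_cons, List.length_nil,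
          Nat.zero_add, List.drop_one, List.tail_cons] at *
        rw [ih t (List.reverse [w] ++ acc) (Nat.le_of_succ_le_succ h)]
        simp
      · have hb : (c == c') = false := beq_eq_false_iff_ne.mpr hc
        rw [hb]
        simp only [Bool.false_eq_true, if_false]
        rw [ih t (c' :: acc) (by simpa using Nat.le_of_succ_le_succ (by simpa using h))]
        simp
        exact fun h => absurd h.symm hc

theorem pvReplace_single (c w : Char) (cs : List Char) :
    PySem.Chars.replace cs [c] [w] = cs.map (fun x => if x == c then w else x) := by
  rw [PySem.Chars.replace]
  simp only [List.isEmpty_cons, Bool.false_eq_true, if_false]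
  simpa using pvReplaceGo c w cs.length cs [] (le_refl _)

-- the translation table lookup
theorem pvTableGetD (c : Char) :
    (((PySem.Dict.empty : PySem.Dict Char Char).insert 'r' 'w').insert 'l' 'w').getD c c
      = (if c == 'l' then 'w' else if c == 'r' then 'w' else c) := by
  by_cases h1 : c = 'l'
  · subst h1; decide
  · by_cases h2 : c = 'r'
    · subst h2; decide
    · have hb1 : (c == 'l') = false := beq_eq_false_iff_ne.mpr h1
      have hb2 : (c == 'r') = false := beq_eq_false_iff_ne.mpr h2
      rw [hb1, hb2]
      simp only [Bool.false_eq_true, if_false]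
      rw [PySem.Dict.getD_insert, if_neg h1, PySem.Dict.getD_insert, if_neg h2]
      simp [PySem.Dict.getD]

-- B's translate equals A's chained replaces
theorem pvTranslate_eq (s : String) :
    String.ofList (s.toList.map (fun c =>
      (((PySem.Dict.empty : PySem.Dict Char Char).insert 'r' 'w').insert 'l' 'w').getD c c))
      = pvU s := by
  have hU : (pvU s).toList
      = (s.toList.map (fun x => if x == 'r' then 'w' else x)).map
          (fun x => if x == 'l' then 'w' else x) := by
    simp only [pvU, PySem.Str.toList_replace]
    rw [show ("r" : String).toList = ['r'] from rfl, show ("w" : String).toList = ['w'] from rfl,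
        show ("l" : String).toList = ['l'] from rfl]
    rw [pvReplace_single, pvReplace_single]
  apply String.ext   -- equality of the underlying char lists
  rw [hU]
  simp only [String.toList_ofList, List.map_map]
  apply List.map_congr_left
  intro c _
  simp only [Function.comp, pvTableGetD]
  by_cases h : c = 'r'
  · subst h; decide
  · have hb : (c == 'r') = false := beq_eq_false_iff_ne.mpr h
    simp [hb]

-- the frequency-dict sum over the five vowels is the vowel countP
theorem pvCountNat (t : List Char) :
    List.count 'a' t + List.count 'e' t + List.count 'i' t + List.count 'o' t + List.count 'u' t
      = List.countP pvVowel t := by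
  induction t with
  | nil => rfl
  | cons c t ih =>
    simp only [List.count_cons, List.countP_cons, pvVowel, Bool.or_eq_true, beq_iff_eq]
    split_ifs <;> simp_all <;> omega

theorem pvVowelSum (cs : List Char) :
    (("aeiou".toList).map (fun v => (PySem.Dict.counter cs).getD v 0)).sum
      = ((cs.countP pvVowel : Nat) : Int) := by
  have hl : "aeiou".toList = ['a','e','i','o','u'] := rfl
  rw [hl]
  simp only [List.map_cons, List.map_nil, List.sum_cons, List.sum_nil,
    PySem.Dict.getD_counter]
  rw [← pvCountNat cs]
  push_cast
  ring

-- endswith "y" is the pyGet?-based last-character test, on every string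
theorem pvEndswith_eq (w : String) :
    PySem.Str.endswith w "y" = pvYend w := by
  rw [pvYend, PySem.Str.endswith_eq, PySem.Str.pyGet?_eq]
  rw [show ("y" : String).toList = ['y'] from rfl]
  rcases List.eq_nil_or_concat w.toList with h | ⟨l, a, h⟩
  · rw [h]; decide
  · rw [h]
    rw [List.concat_eq_append]
    have h1 : PySem.Chars.endswith (l ++ [a]) ['y'] = (a == 'y') := by
      simp [PySem.Chars.endswith, List.isSuffixOf, List.isPrefixOf, eq_comm]
    have h2 : PySem.Chars.pyGet? (l ++ [a]) (-1) = some a := by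
      simp only [PySem.Chars.pyGet?, PySem.List.pyGet?, PySem.List.pyIdx?, List.length_append,
        List.length_cons, List.length_nil]
      norm_num
    rw [h1, h2]
    by_cases h : a = 'y'
    · subst h; decide
    · have hb : (a == 'y') = false := beq_eq_false_iff_ne.mpr h
      have hb' : ((some a == some 'y') : Bool) = false := by
        simpa using hb
      rw [hb, hb']

-- ===== VERDICT (by name: the statement is the Claim_ definition above) =====
theorem Th8_SSBF_spec : Claim_equal_Th8_SSBF := by
  intro my_list _
  show Th8_SSBF my_list = Th8_SSBF_alt my_list
  rw [Th8_SSBF, Th8_SSBF_alt]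
  rw [pvBody_eq, pvSimpleFold, zero_add]
  simp only [PySem.Dict.foldl_insert_getD_add_one_eq_counter]
  have hy : (fun w => PySem.Str.endswith w "y") = pvYend := by
    funext w; exact pvEndswith_eq w
  rw [hy]
  apply Prod.ext
  · rw [pvVowelSum, pvJoinCount]
    rw [show List.map pvContrib my_list = my_list.map (fun s =>
        ((s.toList.countP pvVowel : Nat) : Int)
          + (((PySem.Str.split₀ s).countP pvYend : Nat) : Int)) from rfl]
    rw [PySem.List.sum_map_add_int]
  · simp only [List.nil_append]
    apply List.map_congr_left
    intro s _
    exact (pvTranslate_eq s).symm
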